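-- pv_equiv track=rewrite | github.com/dopexthrone/MeaningWorks | core/project_writer.py | _sanitize_concatenated_code
-- ===== SOURCE A (Python) =====
-- from typing import Dict, Any, List, Optional, Tuple
--
-- def _strip_llm_relative_imports(code: str) -> str:
--     """Strip relative imports (from .foo import Bar) from LLM-emitted code.
--
--     project_writer._resolve_imports() generates correct imports based on
--     actual file layout. LLM-emitted relative imports from prompt hints
--     conflict. Strip them so _resolve_imports is the single source.
--     """
--     lines = code.split("\n")
--     cleaned = []
--     for line in lines:
--         stripped = line.strip()
--         if stripped.startswith("from .") and "import" in stripped: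
--             continue  # Drop LLM-generated relative imports
--         cleaned.append(line)
--     return "\n".join(cleaned)
--
-- def _sanitize_concatenated_code(code: str) -> str:
--     """Sanitize code produced by concatenating multiple component blocks.
--
--     Fixes:
--     0. Strips LLM-generated relative imports (from .foo import Bar)
--     1. Hoists `from __future__ import ...` to the top of the file
--        (Python requires these before any other code)
--     2. Deduplicates import lines that appear multiple times
--     3. Removes duplicate blank-line runs
--
--     Args:
--         code: Concatenated Python source
--
--     Returns:
--         Sanitized source with valid import ordering
--     """
--     # Strip LLM-generated relative imports before deduplication
--     code = _strip_llm_relative_imports(code)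
--     lines = code.split("\n")
--
--     future_imports: List[str] = []
--     regular_imports: List[str] = []
--     body_lines: List[str] = []
--
--     for line in lines:
--         stripped = line.strip()
--         if stripped.startswith("from __future__ import"):
--             if stripped not in future_imports:
--                 future_imports.append(stripped)
--         elif stripped.startswith(("import ", "from ")) and not body_lines:
--             # Import at top of a block — deduplicate
--             if stripped not in regular_imports:
--                 regular_imports.append(line)
--         else:
--             body_lines.append(line)
--
--     # Rebuild: __future__ first, then regular imports, then body
--     # But body may have more import lines interspersed (from concatenation)
--     # Do a second pass: pull all remaining __future__ from body
--     clean_body: List[str] = []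
--     seen_imports: set = set(s.strip() for s in regular_imports)
--     for line in body_lines:
--         stripped = line.strip()
--         if stripped.startswith("from __future__ import"):
--             if stripped not in future_imports:
--                 future_imports.append(stripped)
--             continue
--         # Deduplicate top-level import lines from subsequent blocks
--         if stripped.startswith(("import ", "from ")) and stripped in seen_imports:
--             continue
--         if stripped.startswith(("import ", "from ")):
--             seen_imports.add(stripped)
--         clean_body.append(line)
--
--     parts: List[str] = []
--     if future_imports:
--         parts.extend(future_imports)
--         parts.append("")
--     if regular_imports:
--         parts.extend(regular_imports)
--         parts.append("")
--     parts.extend(clean_body)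
--
--     return "\n".join(parts)
-- ===== SOURCE B (Python) =====
-- def _sanitize_concatenated_code(code: str) -> str:
--     """Single-pass rewrite: one loop over the lines replaces the relative-import
--     strip pass, the header/body partition pass and the body-cleanup pass."""
--     future_imports = []
--     regular_imports = []
--     body_lines = []
--     seen = set()
--     in_header = True
--     for line in code.split("\n"):
--         stripped = line.strip()
--         if stripped.startswith("from .") and "import" in stripped:
--             continue  # drop LLM-generated relative imports
--         if stripped.startswith("from __future__ import"):
--             if stripped not in future_imports:
--                 future_imports.append(stripped)
--         elif in_header and stripped.startswith(("import ", "from ")):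
--             if stripped not in regular_imports:
--                 regular_imports.append(line)
--                 seen.add(stripped)
--         elif stripped.startswith(("import ", "from ")):
--             if stripped not in seen:
--                 seen.add(stripped)
--                 body_lines.append(line)
--         else:
--             body_lines.append(line)
--             in_header = False
--     parts = []
--     if future_imports:
--         parts += future_imports + [""]
--     if regular_imports:
--         parts += regular_imports + [""]
--     return "\n".join(parts + body_lines)
-- ===== Notes on version B (the rewrite author's own statement) =====
-- stated objective: simpler
-- what changed: A's three passes (relative-import strip, re-join/re-split, header partition, then a second cleanup pass over the body with a separately seeded seen-set) are merged into one loop over the lines that maintains future/regular/body lists, a seen set and an in_header flag.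
import Mathlib
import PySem

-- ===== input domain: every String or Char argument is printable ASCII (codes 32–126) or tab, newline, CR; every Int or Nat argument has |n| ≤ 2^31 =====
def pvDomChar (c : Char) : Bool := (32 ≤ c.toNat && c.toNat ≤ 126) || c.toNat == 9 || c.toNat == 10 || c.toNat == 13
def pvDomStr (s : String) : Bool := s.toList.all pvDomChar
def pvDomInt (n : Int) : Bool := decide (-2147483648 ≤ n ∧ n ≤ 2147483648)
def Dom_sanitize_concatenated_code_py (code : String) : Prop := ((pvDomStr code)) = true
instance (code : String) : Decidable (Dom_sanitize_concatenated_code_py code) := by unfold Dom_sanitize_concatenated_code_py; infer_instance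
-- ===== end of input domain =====

-- B merges A's three passes (relative-import strip, header partition, body cleanup) into one loop; objective: simpler.


-- Line tests shared by both Pythons (identical literal tests in Source A and Source B).
def pvIsRel (st : List Char) : Bool :=
  PySem.Chars.startswith st "from .".toList && PySem.Chars.isIn "import".toList st
def pvIsFut (st : List Char) : Bool :=
  PySem.Chars.startswith st "from __future__ import".toList
def pvIsImp (st : List Char) : Bool :=
  PySem.Chars.startswith st "import ".toList || PySem.Chars.startswith st "from ".toList
-- Final reassembly (the identical last paragraph of Source A and Source B).
def pvAssemble (f r c : List (List Char)) : List (List Char) :=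
  (if f.isEmpty then [] else f ++ [[]]) ++ (if r.isEmpty then [] else r ++ [[]]) ++ c

-- ===== PORT A =====
-- loop body of _strip_llm_relative_imports
def pvStripRelStep (cleaned : List (List Char)) (line : List Char) : List (List Char) :=
  let stripped := PySem.Chars.strip line
  if pvIsRel stripped then cleaned else cleaned ++ [line]
-- loop body of A's first pass (future / header imports / body)
def pvPass1Step (st : List (List Char) × List (List Char) × List (List Char)) (line : List Char) :
    List (List Char) × List (List Char) × List (List Char) :=
  let stripped := PySem.Chars.strip line
  if pvIsFut stripped then
    (if stripped ∈ st.1 then st.1 else st.1 ++ [stripped], st.2.1, st.2.2)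
  else if pvIsImp stripped && st.2.2.isEmpty then
    (st.1, if stripped ∈ st.2.1 then st.2.1 else st.2.1 ++ [line], st.2.2)
  else
    (st.1, st.2.1, st.2.2 ++ [line])
-- loop body of A's second pass over body_lines (future hoist / import dedup against seen_imports)
def pvPass2Step (st : List (List Char) × List (List Char) × PySem.Set (List Char)) (line : List Char) :
    List (List Char) × List (List Char) × PySem.Set (List Char) :=
  let stripped := PySem.Chars.strip line
  if pvIsFut stripped then
    (if stripped ∈ st.1 then st.1 else st.1 ++ [stripped], st.2.1, st.2.2)
  else if pvIsImp stripped && PySem.Set.contains st.2.2 stripped then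
    st
  else if pvIsImp stripped then
    (st.1, st.2.1 ++ [line], PySem.Set.add st.2.2 stripped)
  else
    (st.1, st.2.1 ++ [line], st.2.2)

def sanitize_concatenated_code_py (code : String) : String :=
  let cleaned := (PySem.Chars.splitOn code.toList ['\n']).foldl pvStripRelStep []
  let lines := PySem.Chars.splitOn (PySem.Chars.join ['\n'] cleaned) ['\n']
  let p1 := lines.foldl pvPass1Step ([], [], [])
  let p2 := p1.2.2.foldl pvPass2Step
      (p1.1, [], PySem.Set.ofList (p1.2.1.map PySem.Chars.strip))
  String.ofList (PySem.Chars.join ['\n'] (pvAssemble p2.1 p1.2.1 p2.2.1))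

-- ===== PORT B =====
-- state: (future_imports, regular_imports, body_lines, seen, in_header)
def pvBStep
    (st : List (List Char) × List (List Char) × List (List Char) × PySem.Set (List Char) × Bool)
    (line : List Char) :
    List (List Char) × List (List Char) × List (List Char) × PySem.Set (List Char) × Bool :=
  let stripped := PySem.Chars.strip line
  if pvIsRel stripped then st
  else if pvIsFut stripped then
    (if stripped ∈ st.1 then st.1 else st.1 ++ [stripped], st.2.1, st.2.2.1, st.2.2.2.1, st.2.2.2.2)
  else if st.2.2.2.2 && pvIsImp stripped then
    (if stripped ∈ st.2.1 then st
     else (st.1, st.2.1 ++ [line], st.2.2.1, PySem.Set.add st.2.2.2.1 stripped, st.2.2.2.2))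
  else if pvIsImp stripped then
    (if PySem.Set.contains st.2.2.2.1 stripped then st
     else (st.1, st.2.1, st.2.2.1 ++ [line], PySem.Set.add st.2.2.2.1 stripped, st.2.2.2.2))
  else
    (st.1, st.2.1, st.2.2.1 ++ [line], st.2.2.2.1, false)

def sanitize_concatenated_code_py_alt (code : String) : String :=
  let st := (PySem.Chars.splitOn code.toList ['\n']).foldl pvBStep
      ([], [], [], PySem.Set.empty, true)
  String.ofList (PySem.Chars.join ['\n'] (pvAssemble st.1 st.2.1 st.2.2.1))

-- ===== PRECONDITION & SPEC =====
def Spec_sanitize_concatenated_code_py (code : String) (out : String) : Prop := out = sanitize_concatenated_code_py_alt code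
instance (code : String) (out : String) : Decidable (Spec_sanitize_concatenated_code_py code out) := by unfold Spec_sanitize_concatenated_code_py; infer_instance

-- ===== CLAIM (what is proved, stated in full; the proofs are below) =====
def Claim_equal_sanitize_concatenated_code_py : Prop := ∀ (code : String), Dom_sanitize_concatenated_code_py code → Spec_sanitize_concatenated_code_py code (sanitize_concatenated_code_py code)

-- ===== LEMMAS AND PROOFS =====

-- Abbreviations for A's folds (proof-side only).
def pvSR (xs : List (List Char)) : List (List Char) := xs.foldl pvStripRelStep []
def pvA1 (xs : List (List Char)) : List (List Char) × List (List Char) × List (List Char) :=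
  xs.foldl pvPass1Step ([], [], [])
-- B's state as a function of A's first-pass state.
def pvMk (t : List (List Char) × List (List Char) × List (List Char)) :
    List (List Char) × List (List Char) × List (List Char) × PySem.Set (List Char) × Bool :=
  let p2 := t.2.2.foldl pvPass2Step (t.1, [], PySem.Set.ofList (t.2.1.map PySem.Chars.strip))
  (p2.1, t.2.1, p2.2.1, p2.2.2, t.2.2.isEmpty)

-- Reference single-char splitter ('\n'), used to reason about PySem.Chars.splitOn.
def pvSplitAux : List Char → List Char → List (List Char)
  | [], cur => [cur.reverse]
  | x :: rest, cur =>
      if x = '\n' then cur.reverse :: pvSplitAux rest [] else pvSplitAux rest (x :: cur)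

theorem pvGo_eq (cs : List Char) : ∀ (fuel : Nat) (cur : List Char) (acc : List (List Char)),
    cs.length < fuel →
    PySem.Chars.splitOn.go ['\n'] fuel cs cur acc = acc.reverse ++ pvSplitAux cs cur := by
  induction cs with
  | nil =>
    intro fuel cur acc h
    match fuel with
    | fuel + 1 => simp [PySem.Chars.splitOn.go, pvSplitAux]
  | cons x rest ih =>
    intro fuel cur acc h
    match fuel with
    | fuel + 1 =>
      rw [PySem.Chars.splitOn.go]
      by_cases hx : x = '\n'
      · subst hx
        simp only [List.isPrefixOf, BEq.rfl, Bool.and_self, if_pos]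
        simp only [List.length_singleton, List.drop_succ_cons, List.drop_zero]
        rw [ih fuel [] ((cur.reverse :: acc)) (by simpa using h)]
        simp [pvSplitAux]
      · have : List.isPrefixOf ['\n'] (x :: rest) = false := by
          simp [List.isPrefixOf]; intro h'; exact absurd h'.symm hx
        rw [this]
        simp only [Bool.false_eq_true, if_neg, not_false_iff]
        rw [ih fuel (x :: cur) acc (by simpa using h)]
        simp [pvSplitAux, hx]

theorem pvSplitOn_eq (cs : List Char) :
    PySem.Chars.splitOn cs ['\n'] = pvSplitAux cs [] := by
  rw [PySem.Chars.splitOn, pvGo_eq cs (cs.length + 1) [] [] (by omega)]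
  simp

theorem pvSplitAux_no_newline : ∀ (cs cur : List Char), '\n' ∉ cur →
    ∀ l ∈ pvSplitAux cs cur, '\n' ∉ l := by
  intro cs
  induction cs with
  | nil => intro cur hc l hl; simp [pvSplitAux] at hl; subst hl; simpa using hc
  | cons x rest ih =>
    intro cur hc l hl
    by_cases hx : x = '\n'
    · subst hx
      rw [show pvSplitAux ('\n' :: rest) cur = cur.reverse :: pvSplitAux rest [] from by
        simp [pvSplitAux]] at hl
      rcases List.mem_cons.mp hl with h | h
      · subst h; simpa using hc
      · exact ih [] (by simp) l h
    · simp only [pvSplitAux, if_neg hx] at hl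
      exact ih (x :: cur) (by simp [hc, Ne.symm hx]) l hl

theorem pvSplitAux_append : ∀ (x cs cur : List Char), '\n' ∉ x →
    pvSplitAux (x ++ cs) cur = pvSplitAux cs (x.reverse ++ cur) := by
  intro x
  induction x with
  | nil => intro cs cur _; simp
  | cons a y ih =>
    intro cs cur hx
    have ha : a ≠ '\n' := fun h => hx (by simp [h])
    simp only [List.cons_append, pvSplitAux, if_neg ha]
    rw [ih cs (a :: cur) (fun h => hx (by simp [h]))]
    simp

theorem pvSplit_join : ∀ (xs : List (List Char)) (x cur : List Char),
    '\n' ∉ x → (∀ l ∈ xs, '\n' ∉ l) →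
    pvSplitAux (PySem.Chars.join ['\n'] (x :: xs)) cur = (cur.reverse ++ x) :: xs := by
  intro xs
  induction xs with
  | nil =>
    intro x cur hx _
    rw [PySem.Chars.join_singleton]
    rw [show x = x ++ ([] : List Char) by simp, pvSplitAux_append x [] cur (by simpa using hx)]
    simp [pvSplitAux]
  | cons y ys ih =>
    intro x cur hx hxs
    rw [PySem.Chars.join_cons_cons, List.append_assoc, pvSplitAux_append x _ cur hx]
    show pvSplitAux ('\n' :: _) _ = _
    simp only [pvSplitAux]
    rw [show [].append (PySem.Chars.join ['\n'] (y :: ys)) = PySem.Chars.join ['\n'] (y :: ys) from rfl]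
    rw [ih y [] (hxs y (by simp)) (fun l hl => hxs l (by simp [hl]))]
    simp

theorem pvSR_key : ∀ (xs acc : List (List Char)) (l : List Char),
    l ∈ xs.foldl pvStripRelStep acc → l ∈ acc ∨ l ∈ xs := by
  intro xs
  induction xs with
  | nil => intro acc l h; exact Or.inl h
  | cons a ys ih =>
    intro acc l h
    simp only [List.foldl_cons] at h
    rcases ih (pvStripRelStep acc a) l h with h' | h'
    · simp only [pvStripRelStep] at h'
      by_cases hr : pvIsRel (PySem.Chars.strip a) = true
      · rw [if_pos hr] at h'; exact Or.inl h'
      · rw [if_neg hr] at h'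
        rcases List.mem_append.mp h' with h'' | h''
        · exact Or.inl h''
        · simp at h''; simp [h'']
    · simp [h']

theorem pvSR_sublist (xs : List (List Char)) : ∀ l ∈ pvSR xs, l ∈ xs := by
  intro l hl
  rcases pvSR_key xs [] l hl with h | h
  · simp at h
  · exact h

-- pass2 never touches future_imports when body has no __future__ lines
theorem pvPass2_fst : ∀ (b : List (List Char)),
    (∀ x ∈ b, pvIsFut (PySem.Chars.strip x) = false) →
    ∀ f c s, (b.foldl pvPass2Step (f, c, s)).1 = f := by
  intro b
  induction b with
  | nil => intro _ f c s; rfl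
  | cons x ys ih =>
    intro hb f c s
    have hx := hb x (by simp)
    have ihy := ih (fun l hl => hb l (by simp [hl]))
    simp only [List.foldl_cons, pvPass2Step, hx, Bool.false_eq_true, if_false]
    split_ifs <;> exact ihy _ _ _

theorem pvPass2_snd : ∀ (b : List (List Char)),
    (∀ x ∈ b, pvIsFut (PySem.Chars.strip x) = false) →
    ∀ f f' c s, (b.foldl pvPass2Step (f, c, s)).2 = (b.foldl pvPass2Step (f', c, s)).2 := by
  intro b
  induction b with
  | nil => intro _ f f' c s; rfl
  | cons x ys ih =>
    intro hb f f' c s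
    have hx := hb x (by simp)
    have ihy := ih (fun l hl => hb l (by simp [hl]))
    simp only [List.foldl_cons, pvPass2Step, hx, Bool.false_eq_true, if_false]
    split_ifs <;> exact ihy _ _ _ _

-- Main invariant: B's single fold equals pvMk of A's first pass over the stripped lines.
theorem pvOfList_snoc (A : List (List Char)) (y : List Char) :
    PySem.Set.ofList (A ++ [y]) = PySem.Set.add (PySem.Set.ofList A) y := by
  rw [PySem.Set.ofList_eq_foldl, PySem.Set.ofList_eq_foldl, List.foldl_append]
  rfl

theorem pvMain (ls : List (List Char)) :
    (∀ x ∈ (pvA1 (pvSR ls)).2.2, pvIsFut (PySem.Chars.strip x) = false) ∧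
    ls.foldl pvBStep ([], [], [], PySem.Set.empty, true) = pvMk (pvA1 (pvSR ls)) := by
  induction ls using List.reverseRecOn with
  | nil => exact ⟨by intro x hx; simp [pvA1, pvSR] at hx, rfl⟩
  | append_singleton ls l ih =>
    obtain ⟨ihf, ihb⟩ := ih
    have hSR : pvSR (ls ++ [l]) = pvStripRelStep (pvSR ls) l := by
      simp [pvSR, List.foldl_append]
    by_cases hrel : pvIsRel (PySem.Chars.strip l) = true
    · have h1 : pvSR (ls ++ [l]) = pvSR ls := by
        rw [hSR]; simp [pvStripRelStep, hrel]
      have h2 : (ls ++ [l]).foldl pvBStep ([], [], [], PySem.Set.empty, true)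
          = ls.foldl pvBStep ([], [], [], PySem.Set.empty, true) := by
        simp only [List.foldl_append, List.foldl_cons, List.foldl_nil]
        simp [pvBStep, hrel]
      rw [h1, h2]; exact ⟨ihf, ihb⟩
    · have h1 : pvSR (ls ++ [l]) = pvSR ls ++ [l] := by
        rw [hSR]; simp [pvStripRelStep, hrel]
      have hA1 : pvA1 (pvSR ls ++ [l]) = pvPass1Step (pvA1 (pvSR ls)) l := by
        simp [pvA1, List.foldl_append]
      have hBfold : (ls ++ [l]).foldl pvBStep ([], [], [], PySem.Set.empty, true)
          = pvBStep (pvMk (pvA1 (pvSR ls))) l := by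
        simp only [List.foldl_append, List.foldl_cons, List.foldl_nil, ihb]
      rcases hA : pvA1 (pvSR ls) with ⟨f, r, b⟩
      rw [hA] at ihf ihb hA1
      simp only at ihf
      have hP1 : (b.foldl pvPass2Step (f, [], PySem.Set.ofList (r.map PySem.Chars.strip))).1 = f :=
        pvPass2_fst b ihf f _ _
      have hMk : pvMk (f, r, b)
          = (f, r, (b.foldl pvPass2Step (f, [], PySem.Set.ofList (r.map PySem.Chars.strip))).2.1,
             (b.foldl pvPass2Step (f, [], PySem.Set.ofList (r.map PySem.Chars.strip))).2.2,
             b.isEmpty) := by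
        simp only [pvMk, hP1]
      rw [h1, hA1, hBfold, hA, hMk]
      by_cases hfut : pvIsFut (PySem.Chars.strip l) = true
      · -- future line: goes to future_imports on both sides, body unchanged
        have hstep : pvPass1Step (f, r, b) l
            = (if PySem.Chars.strip l ∈ f then f else f ++ [PySem.Chars.strip l], r, b) := by
          simp [pvPass1Step, hfut]
        rw [hstep]
        refine ⟨ihf, ?_⟩
        have hP1' := pvPass2_fst b ihf
            (if PySem.Chars.strip l ∈ f then f else f ++ [PySem.Chars.strip l])
            ([] : List (List Char)) (PySem.Set.ofList (r.map PySem.Chars.strip))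
        have hP2' := pvPass2_snd b ihf
            (if PySem.Chars.strip l ∈ f then f else f ++ [PySem.Chars.strip l]) f
            ([] : List (List Char)) (PySem.Set.ofList (r.map PySem.Chars.strip))
        simp only [pvMk, hP1', hP2']
        simp [pvBStep, hrel, hfut]
      · by_cases hhdr : (pvIsImp (PySem.Chars.strip l) && b.isEmpty) = true
        · -- header import
          obtain ⟨himp, hbe⟩ := Bool.and_eq_true_iff.mp hhdr
          have hb0 : b = [] := List.isEmpty_iff.mp hbe
          subst hb0
          have hstep : pvPass1Step (f, r, []) l
              = (f, if PySem.Chars.strip l ∈ r then r else r ++ [l], []) := by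
            simp [pvPass1Step, hfut, himp]
          rw [hstep]
          refine ⟨by intro x hx; simp at hx, ?_⟩
          simp only [List.foldl_nil, pvMk]
          by_cases hmem : PySem.Chars.strip l ∈ r
          · simp [pvBStep, hrel, hfut, himp, hmem]
          · have hseed : PySem.Set.ofList ((r ++ [l]).map PySem.Chars.strip)
                = PySem.Set.add (PySem.Set.ofList (r.map PySem.Chars.strip)) (PySem.Chars.strip l) := by
              rw [List.map_append]; exact pvOfList_snoc _ _
            simp [pvBStep, hrel, hfut, himp, hmem]
            exact (pvOfList_snoc _ _).symm
        · -- body line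
          have hstep : pvPass1Step (f, r, b) l = (f, r, b ++ [l]) := by
            simp only [pvPass1Step, hfut, Bool.false_eq_true, if_false, hhdr]
          rw [hstep]
          have hnf' : ∀ x ∈ b ++ [l], pvIsFut (PySem.Chars.strip x) = false := by
            intro x hx
            rcases List.mem_append.mp hx with h | h
            · exact ihf x h
            · simp at h; subst h; exact Bool.eq_false_iff.mpr hfut
          refine ⟨hnf', ?_⟩
          have hsplit : (b ++ [l]).foldl pvPass2Step
                (f, [], PySem.Set.ofList (r.map PySem.Chars.strip))
              = pvPass2Step (f,
                  (b.foldl pvPass2Step (f, [], PySem.Set.ofList (r.map PySem.Chars.strip))).2.1,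
                  (b.foldl pvPass2Step (f, [], PySem.Set.ofList (r.map PySem.Chars.strip))).2.2) l := by
            simp only [List.foldl_append, List.foldl_cons, List.foldl_nil]
            congr 1
            exact Prod.ext_iff.mpr ⟨hP1, rfl⟩
          simp only [pvMk, hsplit]
          by_cases himp : pvIsImp (PySem.Chars.strip l) = true
          · have hbe : b.isEmpty = false := by
              cases hbb : b.isEmpty
              · rfl
              · exact absurd (by simp [himp, hbb]) hhdr
            simp only [pvBStep, pvPass2Step] at *
            simp [hrel, hfut, himp, hbe]
            split_ifs <;> simp
          · simp [pvBStep, pvPass2Step, hrel, hfut, himp]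

-- ===== VERDICT (by name: the statement is the Claim_ definition above) =====
theorem pvLines_no_newline (code : String) :
    ∀ l ∈ PySem.Chars.splitOn code.toList ['\n'], '\n' ∉ l := by
  rw [pvSplitOn_eq]
  exact pvSplitAux_no_newline code.toList [] (by simp)

theorem sanitize_concatenated_code_py_spec : Claim_equal_sanitize_concatenated_code_py := by
  unfold Claim_equal_sanitize_concatenated_code_py
  intro code _
  unfold Spec_sanitize_concatenated_code_py
  obtain ⟨hnofut, hB⟩ := pvMain (PySem.Chars.splitOn code.toList ['\n'])
  simp only [sanitize_concatenated_code_py, sanitize_concatenated_code_py_alt]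
  rw [show (PySem.Chars.splitOn code.toList ['\n']).foldl pvStripRelStep []
      = pvSR (PySem.Chars.splitOn code.toList ['\n']) from rfl]
  rw [hB]
  rcases hcl : pvSR (PySem.Chars.splitOn code.toList ['\n']) with _ | ⟨x, xs⟩
  · rfl
  · have hnn : ∀ l ∈ x :: xs, '\n' ∉ l := by
      intro l hl
      exact pvLines_no_newline code l
        (pvSR_sublist (PySem.Chars.splitOn code.toList ['\n']) l (hcl ▸ hl))
    have hlines : PySem.Chars.splitOn (PySem.Chars.join ['\n'] (x :: xs)) ['\n'] = x :: xs := by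
      rw [pvSplitOn_eq, pvSplit_join xs x [] (hnn x (by simp)) (fun l hl => hnn l (by simp [hl]))]
      simp
    rw [hlines, ← hcl]
    simp only [pvMk, pvA1]
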